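-- pv_equiv track=rewrite | github.com/gstam/roc | roc/expenditure_register/validators.py | _validate_afm
-- ===== SOURCE A (Python) =====
-- def _validate_afm(afm):
--     is_valid = False
--
--     if len(afm) == 9 and afm.isdigit():
--         chcknumbers = [0, 2, 4, 8, 16, 32, 64, 128, 256]
--         lchcknumbers = len(chcknumbers) - 1
--         sum = 0
--         for i in range(9):
--             sum += (int(afm[i]) * chcknumbers[lchcknumbers - i])
--         ch_digit = int(afm[8])
--         ypoloipo = sum % 11
--
--         if ypoloipo == 10:
--             ypoloipo = 0
--
--         if (ypoloipo == ch_digit):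
--             is_valid = True
--
--     return is_valid
-- ===== SOURCE B (Python) =====
-- def _validate_afm(afm):
--     if len(afm) != 9 or not afm.isdigit():
--         return False
--     acc = 0
--     for ch in afm[:8]:
--         acc = acc * 2 + int(ch)
--     r = (2 * acc) % 11
--     if r == 10:
--         r = 0
--     return r == int(afm[8])
-- ===== Notes on version B (the rewrite author's own statement) =====
-- stated objective: simpler
-- what changed: Replaced the power-of-two weight table and the index loop summing int(afm[i])*table[8-i] by a Horner fold acc=acc*2+int(ch) over the first 8 characters (weighted sum = 2*acc), with an early-return guard.
import Mathlib
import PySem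

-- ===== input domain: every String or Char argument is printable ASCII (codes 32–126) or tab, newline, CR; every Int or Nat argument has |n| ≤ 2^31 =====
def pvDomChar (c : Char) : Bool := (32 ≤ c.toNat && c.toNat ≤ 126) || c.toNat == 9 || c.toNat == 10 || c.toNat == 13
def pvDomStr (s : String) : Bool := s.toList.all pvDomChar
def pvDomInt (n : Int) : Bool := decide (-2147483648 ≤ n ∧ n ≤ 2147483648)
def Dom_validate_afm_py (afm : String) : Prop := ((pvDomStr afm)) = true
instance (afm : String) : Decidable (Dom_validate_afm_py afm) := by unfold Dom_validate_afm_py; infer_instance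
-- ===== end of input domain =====

-- B replaces the power-of-two weight table and index loop by a Horner fold over the first 8 digits (objective: simpler).
-- ===== PORT A =====
-- B changes the weight table + index loop into a Horner fold (see header of PORT B); equivalence proved below.
-- int(afm[i]) is ported as ofChars? on the single indexed char; the .getD defaults are unreachable:
-- the guard guarantees 9 chars, all ASCII digits, so index and int() never fail there.
def validate_afm_py (afm : String) : Bool :=
  let is_valid := false
  if PySem.Str.len afm == 9 && PySem.Str.strIsdigit afm then
    let chcknumbers : List Int := [0, 2, 4, 8, 16, 32, 64, 128, 256]
    let lchcknumbers : Int := (chcknumbers.length : Int) - 1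
    let sum := (PySem.List.pyRange 0 9 1).foldl
      (fun s i =>
        s + (PySem.Int.ofChars? [(PySem.Str.pyGet? afm i).getD '0']).getD 0
              * PySem.List.pyGetD chcknumbers (lchcknumbers - i) 0) 0
    let ch_digit := (PySem.Int.ofChars? [(PySem.Str.pyGet? afm 8).getD '0']).getD 0
    let ypoloipo := PySem.Int.mod sum 11
    let ypoloipo := if ypoloipo == 10 then (0 : Int) else ypoloipo
    if ypoloipo == ch_digit then true else is_valid
  else is_valid

-- ===== PORT B =====
-- Horner fold over the first 8 digits; 2*acc reproduces the weights 2^8..2^1 without a table.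
def validate_afm_py_alt (afm : String) : Bool :=
  if PySem.Str.len afm != 9 || !PySem.Str.strIsdigit afm then false
  else
    let acc := (PySem.Str.slice afm none (some 8)).toList.foldl
      (fun a c => a * 2 + (PySem.Int.ofChars? [c]).getD 0) 0
    let r := PySem.Int.mod (2 * acc) 11
    let r := if r == 10 then (0 : Int) else r
    r == (PySem.Int.ofChars? [(PySem.Str.pyGet? afm 8).getD '0']).getD 0

-- ===== PRECONDITION & SPEC =====
def Spec_validate_afm_py (afm : String) (out : Bool) : Prop := out = validate_afm_py_alt afm
instance (afm : String) (out : Bool) : Decidable (Spec_validate_afm_py afm out) := by unfold Spec_validate_afm_py; infer_instance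

-- ===== CLAIM (what is proved, stated in full; the proofs are below) =====
def Claim_equal_validate_afm_py : Prop := ∀ (afm : String), Dom_validate_afm_py afm → Spec_validate_afm_py afm (validate_afm_py afm)

-- ===== LEMMAS AND PROOFS =====

-- The two weighted sums agree: A's table-weighted index sum equals twice B's Horner accumulator.
theorem horner_eq (c0 c1 c2 c3 c4 c5 c6 c7 c8 : Char) :
    (PySem.List.pyRange 0 9 1).foldl
      (fun s i =>
        s + (PySem.Int.ofChars? [(PySem.List.pyGet? [c0,c1,c2,c3,c4,c5,c6,c7,c8] i).getD '0']).getD 0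
              * PySem.List.pyGetD [0, 2, 4, 8, 16, 32, 64, 128, 256] (8 - i) 0) 0
    = 2 * List.foldl (fun a c => a * 2 + (PySem.Int.ofChars? [c]).getD 0) 0
        (PySem.List.slice [c0,c1,c2,c3,c4,c5,c6,c7,c8] none (some 8)) := by
  rw [show PySem.List.pyRange 0 9 1 = [0,1,2,3,4,5,6,7,8] from by decide]
  norm_num [PySem.List.pyGet?, PySem.List.pyIdx?, PySem.List.pyGetD, PySem.List.slice, List.foldl, List.getElem_cons_succ, List.getElem_cons_zero, List.take_succ_cons]
  simp only [show Int.toNat 2 = 2 from rfl, show Int.toNat 3 = 3 from rfl, show Int.toNat 4 = 4 from rfl, show Int.toNat 5 = 5 from rfl, show Int.toNat 6 = 6 from rfl, show Int.toNat 7 = 7 from rfl, show Int.toNat 8 = 8 from rfl, show ([c0,c1,c2,c3,c4,c5,c6,c7,c8] : List Char)[2] = c2 from rfl, show ([c0,c1,c2,c3,c4,c5,c6,c7,c8] : List Char)[3] = c3 from rfl, show ([c0,c1,c2,c3,c4,c5,c6,c7,c8] : List Char)[4] = c4 from rfl, show ([c0,c1,c2,c3,c4,c5,c6,c7,c8] :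 List Char)[5] = c5 from rfl, show ([c0,c1,c2,c3,c4,c5,c6,c7,c8] : List Char)[6] = c6 from rfl, show ([c0,c1,c2,c3,c4,c5,c6,c7,c8] : List Char)[7] = c7 from rfl, show List.take 8 ([c0,c1,c2,c3,c4,c5,c6,c7,c8] : List Char) = [c0,c1,c2,c3,c4,c5,c6,c7] from rfl, show ([0, 2, 4, 8, 16, 32, 64, 128, 256] : List Int)[2] = 4 from rfl, show ([0, 2, 4, 8, 16, 32, 64, 128, 256] : List Int)[3] = 8 from rfl, show ([0, 2, 4, 8, 16, 32, 64, 128, 256] : List Int)[4] = 16 from rfl, show ([0, 2, 4, 8, 16, 32, 64, 128, 256] : List Int)[5] = 32 from rfl, show ([0, 2, 4, 8, 16, 32, 64, 128, 256] : List Int)[6] = 64 from rfl, show ([0, 2, 4, 8, 16, 32, 64, 128, 256] : List Int)[7] = 128 from rfl, show ([0, 2, 4, 8, 16, 32, 64, 128, 256] : List Int)[8] = 256 from rfl, List.foldl]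
  ring


-- ===== VERDICT (by name: the statement is the Claim_ definition above) =====
theorem validate_afm_py_spec : Claim_equal_validate_afm_py := by
  intro afm _
  unfold Spec_validate_afm_py validate_afm_py validate_afm_py_alt
  by_cases h9 : afm.toList.length = 9
  · obtain ⟨c0,c1,c2,c3,c4,c5,c6,c7,c8, hcs⟩ :
        ∃ a b c d e f g i j, afm.toList = [a,b,c,d,e,f,g,i,j] := by
      rcases h : afm.toList with _|⟨a,_|⟨b,_|⟨c,_|⟨d,_|⟨e,_|⟨f,_|⟨g,_|⟨i,_|⟨j,_|⟨k,t⟩⟩⟩⟩⟩⟩⟩⟩⟩⟩ <;>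
        rw [h] at h9 <;> simp at h9
      exact ⟨_,_,_,_,_,_,_,_,_,rfl⟩
    simp only [PySem.Str.len_eq, PySem.Str.strIsdigit_eq, PySem.Str.pyGet?, PySem.Str.slice, hcs,
      List.length_cons, List.length_nil]
    norm_num
    by_cases hd : PySem.Chars.strIsdigit [c0,c1,c2,c3,c4,c5,c6,c7,c8]
    · simp only [hd, Bool.true_and]
      rw [horner_eq]
      exact (Bool.beq_eq_decide_eq _ _).symm
    · simp [hd]
  · have hl : afm.length = afm.toList.length := by simp
    have hne : ((afm.length : Int)) ≠ 9 := by rw [hl]; omega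
    simp [PySem.Str.len_eq, PySem.Str.strIsdigit_eq, hne]
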